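-- pv_equiv track=rewrite | github.com/FinnClair-Su/ArcanAgent | backend/agents/the_hermit.py | _build_prerequisite_chain
-- ===== SOURCE A (Python) =====
-- from typing import Dict, List, Optional, Any, Set, Tuple
--
-- def _build_prerequisite_chain(objective: str, prerequisite_map: Dict[str, List[str]]) -> List[str]:
--     """Build the complete prerequisite chain for an objective."""
--     chain = []
--     visited = set()
--
--     def dfs(obj):
--         if obj in visited:
--             return
--         visited.add(obj)
--
--         prerequisites = prerequisite_map.get(obj, [])
--         for prereq in prerequisites:
--             dfs(prereq)
--             if prereq not in chain:
--                 chain.append(prereq)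
--
--     dfs(objective)
--     return chain
-- ===== SOURCE B (Python) =====
-- def _build_prerequisite_chain(objective, prerequisite_map):
--     """Iterative DFS with an explicit frame stack instead of recursion."""
--     chain = []
--     visited = {objective}
--     stack = [(objective, prerequisite_map.get(objective, []))]
--     while stack:
--         node, rem = stack.pop()
--         if rem:
--             p, rest = rem[0], rem[1:]
--             stack.append((node, rest))
--             if p not in visited:
--                 visited.add(p)
--                 stack.append((p, prerequisite_map.get(p, [])))
--             elif p not in chain:
--                 chain.append(p)
--         else:
--             if stack and node not in chain:
--                 chain.append(node)
--     return chain
-- ===== Notes on version B (the rewrite author's own statement) =====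
-- stated objective: alternative
-- what changed: A's recursive nested dfs is replaced by an iterative DFS over an explicit stack of (node, remaining-prerequisites) frames, appending a popped node in its parent's context so the edge-timed append order is preserved exactly.
import Mathlib
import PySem

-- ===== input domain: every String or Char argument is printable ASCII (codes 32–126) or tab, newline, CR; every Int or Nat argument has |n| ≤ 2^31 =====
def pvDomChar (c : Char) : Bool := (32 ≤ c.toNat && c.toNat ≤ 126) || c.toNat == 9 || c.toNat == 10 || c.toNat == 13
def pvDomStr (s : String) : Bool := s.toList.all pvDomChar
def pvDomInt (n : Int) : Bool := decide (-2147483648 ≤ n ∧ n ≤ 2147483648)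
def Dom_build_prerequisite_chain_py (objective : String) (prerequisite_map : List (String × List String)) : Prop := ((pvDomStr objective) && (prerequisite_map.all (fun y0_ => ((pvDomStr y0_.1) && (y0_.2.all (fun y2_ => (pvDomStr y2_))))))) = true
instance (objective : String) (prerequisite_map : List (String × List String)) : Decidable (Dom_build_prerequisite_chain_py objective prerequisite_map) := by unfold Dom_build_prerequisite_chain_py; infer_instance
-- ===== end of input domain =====

-- B replaces A's recursive DFS by an iterative DFS over an explicit stack of (node, remaining-prerequisites) frames (alternative decomposition, same cost); return values agree everywhere.

-- ===== PORT A =====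
-- prerequisite_map.get(obj, [])
def pvPrereqs (m : List (String × List String)) (obj : String) : List String :=
  PySem.Dict.getD (PySem.Dict.mk m) obj []

-- every node the recursion can ever visit: the objective and every prerequisite occurring in the map
def pvNodes (objective : String) (m : List (String × List String)) : List String :=
  objective :: m.flatMap (fun kv => kv.2)

-- the recursive dfs of A, with fuel (the recursion depth is bounded by the number of distinct visited nodes,
-- so fuel (pvNodes …).length + 1 is never exhausted); state = (visited, chain)
def pvDfsA (m : List (String × List String)) : Nat → (PySem.Set String × List String) → String → (PySem.Set String × List String)
  | 0, s, _ => s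
  | f+1, s, obj =>
    if s.1.contains obj then s
    else
      (pvPrereqs m obj).foldl
        (fun t p =>
          let t1 := pvDfsA m f t p
          if p ∈ t1.2 then t1 else (t1.1, t1.2 ++ [p]))
        (PySem.Set.add s.1 obj, s.2)

def build_prerequisite_chain_py (objective : String) (prerequisite_map : List (String × List String)) : List String :=
  (pvDfsA prerequisite_map ((pvNodes objective prerequisite_map).length + 1) (PySem.Set.ofList [], []) objective).2

-- ===== PORT B =====
-- one iteration of B's while loop; stack frames are (node, remaining prerequisites), head = top of stack;
-- fuel counts loop iterations (none = fuel exhausted, which pvFuelB below provably prevents)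
def pvLoopB (m : List (String × List String)) : Nat → PySem.Set String → List String → List (String × List String) → Option (List String)
  | 0, _, _, _ => none
  | f+1, v, ch, stack =>
    match stack with
    | [] => some ch
    | (node, rem) :: rest =>
      match rem with
      | p :: rem' =>
        if v.contains p = false then
          pvLoopB m f (PySem.Set.add v p) ch ((p, pvPrereqs m p) :: (node, rem') :: rest)
        else
          pvLoopB m f v (if p ∈ ch then ch else ch ++ [p]) ((node, rem') :: rest)
      | [] =>
        pvLoopB m f v (if rest ≠ [] ∧ node ∉ ch then ch ++ [node] else ch) rest

-- the longest prerequisite list in the map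
def pvL (m : List (String × List String)) : Nat :=
  m.foldl (fun a kv => max a kv.2.length) 0

-- pvE L f bounds the number of loop iterations spent on one stack entry of a frame whose children run at fuel f
def pvE (L : Nat) : Nat → Nat
  | 0 => 2
  | f+1 => 2 + L * pvE L f

def pvFuelB (objective : String) (m : List (String × List String)) : Nat :=
  2 + (pvPrereqs m objective).length * pvE (pvL m) (pvNodes objective m).length

def build_prerequisite_chain_py_alt (objective : String) (prerequisite_map : List (String × List String)) : List String :=
  match pvLoopB prerequisite_map (pvFuelB objective prerequisite_map)
      (PySem.Set.ofList [objective]) [] [(objective, pvPrereqs prerequisite_map objective)] with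
  | some r => r
  | none => []

-- ===== PRECONDITION & SPEC =====
def Spec_build_prerequisite_chain_py (objective : String) (prerequisite_map : List (String × List String)) (out : List String) : Prop := out = build_prerequisite_chain_py_alt objective prerequisite_map
instance (objective : String) (prerequisite_map : List (String × List String)) (out : List String) : Decidable (Spec_build_prerequisite_chain_py objective prerequisite_map out) := by unfold Spec_build_prerequisite_chain_py; infer_instance

-- ===== CLAIM (what is proved, stated in full; the proofs are below) =====
def Claim_equal_build_prerequisite_chain_py : Prop := ∀ (objective : String) (prerequisite_map : List (String × List String)), Dom_build_prerequisite_chain_py objective prerequisite_map → Spec_build_prerequisite_chain_py objective prerequisite_map (build_prerequisite_chain_py objective prerequisite_map)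

-- ===== LEMMAS AND PROOFS =====

-- the dfs loop body of A, as a named step function (definitionally the lambda inside pvDfsA)
def pvStep (m : List (String × List String)) (f : Nat) :
    (PySem.Set String × List String) → String → (PySem.Set String × List String) :=
  fun t p =>
    let t1 := pvDfsA m f t p
    if p ∈ t1.2 then t1 else (t1.1, t1.2 ++ [p])

theorem pvDfsA_succ (m : List (String × List String)) (f : Nat) (s : PySem.Set String × List String) (obj : String) :
    pvDfsA m (f+1) s obj =
      if s.1.contains obj then s
      else (pvPrereqs m obj).foldl (pvStep m f) (PySem.Set.add s.1 obj, s.2) := rfl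

-- number of not-yet-visited node occurrences
def pvUnvis (U : List String) (v : PySem.Set String) : Nat :=
  U.countP (fun u => !(v.contains u))

theorem pvPrereqs_sub (m : List (String × List String)) (p q : String) (h : q ∈ pvPrereqs m p) :
    q ∈ m.flatMap (fun kv => kv.2) := by
  unfold pvPrereqs at h
  rw [PySem.Dict.getD_eq_get?_getD] at h
  rcases he : PySem.Dict.get? (PySem.Dict.mk m) p with _ | vs
  · rw [he] at h; simp at h
  · rw [he] at h
    simp only [Option.getD_some] at h
    simp only [PySem.Dict.get?] at he
    rcases Option.map_eq_some_iff.mp he with ⟨pair, hf, hv⟩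
    have hm : pair ∈ m := by simpa [PySem.Dict.mk] using List.mem_of_find?_eq_some hf
    exact List.mem_flatMap.mpr ⟨pair, hm, hv ▸ h⟩

theorem pvInit_le_foldl (l : List (String × List String)) :
    ∀ a : Nat, a ≤ l.foldl (fun a kv => max a kv.2.length) a := by
  induction l with
  | nil => simp
  | cons kv l ih => intro a; exact le_trans (le_max_left _ _) (ih _)

theorem pvMem_le_foldl (l : List (String × List String)) :
    ∀ (a : Nat) (kv : String × List String), kv ∈ l →
      kv.2.length ≤ l.foldl (fun a kv => max a kv.2.length) a := by
  induction l with
  | nil => simp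
  | cons kv0 l ih =>
    intro a kv h
    rcases List.mem_cons.mp h with h | h
    · subst h; exact le_trans (le_max_right _ _) (pvInit_le_foldl l _)
    · exact ih _ _ h

theorem pvPrereqs_len_le (m : List (String × List String)) (p : String) :
    (pvPrereqs m p).length ≤ pvL m := by
  unfold pvPrereqs pvL
  rw [PySem.Dict.getD_eq_get?_getD]
  rcases he : PySem.Dict.get? (PySem.Dict.mk m) p with _ | vs
  · simp
  · simp only [Option.getD_some]
    simp only [PySem.Dict.get?] at he
    rcases Option.map_eq_some_iff.mp he with ⟨pair, hf, hv⟩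
    have hm : pair ∈ m := by simpa [PySem.Dict.mk] using List.mem_of_find?_eq_some hf
    exact hv ▸ pvMem_le_foldl m 0 pair hm

theorem pvLoopB_mono (m : List (String × List String)) (f g : Nat) (v : PySem.Set String)
    (ch : List String) (st : List (String × List String)) (r : List String)
    (hfg : f ≤ g) (h : pvLoopB m f v ch st = some r) : pvLoopB m g v ch st = some r := by
  induction f generalizing g v ch st with
  | zero => simp [pvLoopB] at h
  | succ f ih =>
    obtain ⟨g, rfl⟩ : ∃ g', g = g' + 1 := ⟨g - 1, by omega⟩
    match st with
    | [] => simpa [pvLoopB] using h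
    | (node, p :: rem') :: rest =>
      simp only [pvLoopB] at h ⊢
      by_cases hc : v.contains p = false
      · simp only [if_pos hc] at h ⊢; exact ih _ _ _ _ (by omega) h
      · simp only [if_neg hc] at h ⊢; exact ih _ _ _ _ (by omega) h
    | (node, []) :: rest =>
      simp only [pvLoopB] at h ⊢
      exact ih _ _ _ _ (by omega) h

theorem pvFold_sub (step : (PySem.Set String × List String) → String → (PySem.Set String × List String))
    (hstep : ∀ s p x, x ∈ s.1 → x ∈ (step s p).1) (ps : List String) :
    ∀ (s : PySem.Set String × List String) (x : String), x ∈ s.1 → x ∈ (ps.foldl step s).1 := by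
  induction ps with
  | nil => simp
  | cons p ps ih => intro s x hx; exact ih _ _ (hstep _ _ _ hx)

theorem pvDfsA_sub (m : List (String × List String)) (f : Nat) :
    ∀ (s : PySem.Set String × List String) (p x : String), x ∈ s.1 → x ∈ (pvDfsA m f s p).1 := by
  induction f with
  | zero => intro s p x hx; simpa [pvDfsA] using hx
  | succ f ih =>
    intro s p x hx
    rw [pvDfsA_succ]
    split
    · exact hx
    · refine pvFold_sub (pvStep m f) ?_ _ _ _ ?_
      · intro t q y hy
        have h1 : y ∈ (pvDfsA m f t q).1 := ih _ _ _ hy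
        simp only [pvStep]
        split <;> simpa using h1
      · simpa using Or.inl hx

theorem pvUnvis_mono (U : List String) (v w : PySem.Set String) (h : ∀ x, x ∈ v → x ∈ w) :
    pvUnvis U w ≤ pvUnvis U v := by
  unfold pvUnvis
  refine List.countP_mono_left ?_
  intro a _ ha
  simp only [Bool.not_eq_eq_eq_not, Bool.not_true, ← Bool.not_eq_true] at *
  intro hc
  exact ha (by simpa [PySem.Set.contains_iff] using h a (by simpa [PySem.Set.contains_iff] using hc))

theorem pvUnvis_add_lt (U : List String) (v : PySem.Set String) (p : String)
    (hU : p ∈ U) (hv : p ∉ v) : pvUnvis U (PySem.Set.add v p) < pvUnvis U v := by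
  induction U with
  | nil => simp at hU
  | cons u U ih =>
    unfold pvUnvis at *
    by_cases hup : u = p
    · subst hup
      have h1 : (PySem.Set.add v u).contains u = true := by
        simpa [PySem.Set.contains_iff, PySem.Set.mem_add] using Or.inr rfl
      have h2 : v.contains u = false := by
        simp only [← Bool.not_eq_true, PySem.Set.contains_iff]
        simpa using hv
      have h3 : List.countP (fun u_1 => !(v.add u).contains u_1) (u :: U)
          = List.countP (fun u_1 => !(v.add u).contains u_1) U := by
        simp [List.countP_cons, h1]
      have h4 : List.countP (fun u_1 => !v.contains u_1) (u :: U)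
          = List.countP (fun u_1 => !v.contains u_1) U + 1 := by
        simp [List.countP_cons, h2, hv]
      rw [h3, h4]
      have := pvUnvis_mono U v (PySem.Set.add v u) (fun x hx => (PySem.Set.mem_add _ _ _).mpr (Or.inl hx))
      unfold pvUnvis at this
      omega
    · have hU' : p ∈ U := by
        rcases List.mem_cons.mp hU with h | h
        · exact absurd h (fun e => hup e.symm)
        · exact h
      have heq : (PySem.Set.add v p).contains u = v.contains u := by
        by_cases hc : u ∈ v
        · simp [PySem.Set.contains_iff, PySem.Set.mem_add, hc]
        · have hnadd : ¬ u ∈ PySem.Set.add v p := by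
            simp only [PySem.Set.mem_add]
            exact fun h => h.elim hc hup
          simp [← Bool.not_eq_true, PySem.Set.contains_iff, hc, hnadd]
      simp only [List.countP_cons, heq]
      have := ih hU'
      omega

theorem pvE_pos (L f : Nat) : 1 ≤ pvE L f := by
  cases f <;> simp [pvE] <;> omega

theorem pvStep_sub (m : List (String × List String)) (f : Nat) :
    ∀ (t : PySem.Set String × List String) (q y : String), y ∈ t.1 → y ∈ (pvStep m f t q).1 := by
  intro t q y hy
  simp only [pvStep]
  split <;> simpa using pvDfsA_sub m f t q y hy

theorem pvMain (m : List (String × List String)) (U : List String) (L : Nat)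
    (HU : ∀ p q, q ∈ pvPrereqs m p → q ∈ U) (HL : ∀ p, (pvPrereqs m p).length ≤ L) :
    ∀ (f : Nat) (ps : List String) (v : PySem.Set String) (ch : List String)
      (node : String) (rest : List (String × List String)) (G : Nat) (r : List String),
      pvUnvis U v < f →
      (∀ p ∈ ps, p ∈ U) →
      pvLoopB m G (ps.foldl (pvStep m f) (v, ch)).1 (ps.foldl (pvStep m f) (v, ch)).2
          ((node, []) :: rest) = some r →
      ∃ g, g ≤ G + ps.length * pvE L f ∧ pvLoopB m g v ch ((node, ps) :: rest) = some r := by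
  intro f
  induction f with
  | zero =>
    intro ps v ch node rest G r hf _ _
    exact absurd hf (Nat.not_lt_zero _)
  | succ f ihf =>
    intro ps
    induction ps with
    | nil =>
      intro v ch node rest G r _ _ hcont
      exact ⟨G, by omega, by simpa using hcont⟩
    | cons p ps' ihp =>
      intro v ch node rest G r hf hps hcont
      have hpU : p ∈ U := hps p List.mem_cons_self
      rw [List.foldl_cons] at hcont
      by_cases hpv : p ∈ v
      · -- p already visited: one loop iteration appends p (if new) and moves on
        have hc : v.contains p = true := by simpa [PySem.Set.contains_iff] using hpv
        have hs1 : pvDfsA m (f+1) (v, ch) p = (v, ch) := by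
          rw [pvDfsA_succ]
          simp only [hc, if_pos]
        have hstep : pvStep m (f+1) (v, ch) p = (v, if p ∈ ch then ch else ch ++ [p]) := by
          simp only [pvStep, hs1]
          by_cases hpc : p ∈ ch <;> simp [hpc]
        rw [hstep] at hcont
        obtain ⟨g', hg', hrun⟩ :=
          ihp v (if p ∈ ch then ch else ch ++ [p]) node rest G r hf
            (fun q hq => hps q (List.mem_cons_of_mem _ hq)) hcont
        refine ⟨g' + 1, ?_, ?_⟩
        · have hE := pvE_pos L (f+1)
          simp only [List.length_cons, Nat.succ_mul]
          omega
        · simp only [pvLoopB, hc]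
          simpa using hrun
      · -- p unvisited: one iteration pushes p's frame; by the outer IH the frame is fully
        -- processed and popped (appending p), then the tail continues from the new state
        have hc : v.contains p = false := by
          simp only [← Bool.not_eq_true, PySem.Set.contains_iff]
          simpa using hpv
        have hs1 : pvDfsA m (f+1) (v, ch) p
            = (pvPrereqs m p).foldl (pvStep m f) (PySem.Set.add v p, ch) := by
          rw [pvDfsA_succ]
          simp only [hc]
          simp
        set s1 := (pvPrereqs m p).foldl (pvStep m f) (PySem.Set.add v p, ch) with hs1def
        have hstep : pvStep m (f+1) (v, ch) p
            = (s1.1, if p ∈ s1.2 then s1.2 else s1.2 ++ [p]) := by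
          simp only [pvStep, hs1]
          by_cases hpc : p ∈ s1.2 <;> simp [hpc]
        rw [hstep] at hcont
        have hsub1 : ∀ x, x ∈ v → x ∈ s1.1 := by
          intro x hx
          exact pvFold_sub _ (pvStep_sub m f) _ (PySem.Set.add v p, ch) x
            (by simpa [PySem.Set.mem_add] using Or.inl hx)
        have hfv1 : pvUnvis U s1.1 < f + 1 :=
          lt_of_le_of_lt (pvUnvis_mono U v s1.1 hsub1) hf
        obtain ⟨g₂, hg₂, hrun₂⟩ :=
          ihp s1.1 (if p ∈ s1.2 then s1.2 else s1.2 ++ [p]) node rest G r hfv1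
            (fun q hq => hps q (List.mem_cons_of_mem _ hq)) hcont
        have hpop : pvLoopB m (g₂+1) s1.1 s1.2 ((p, []) :: (node, ps') :: rest) = some r := by
          simp only [pvLoopB]
          have hif : (if ((node, ps') :: rest) ≠ [] ∧ p ∉ s1.2 then s1.2 ++ [p] else s1.2)
              = (if p ∈ s1.2 then s1.2 else s1.2 ++ [p]) := by
            by_cases hpc : p ∈ s1.2 <;> simp [hpc]
          rw [hif]
          exact hrun₂
        have hfadd : pvUnvis U (PySem.Set.add v p) < f := by
          have h1 := pvUnvis_add_lt U v p hpU hpv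
          omega
        obtain ⟨g₃, hg₃, hrun₃⟩ :=
          ihf (pvPrereqs m p) (PySem.Set.add v p) ch p ((node, ps') :: rest) (g₂+1) r hfadd
            (fun q hq => HU p q hq) (by rw [← hs1def]; exact hpop)
        refine ⟨g₃ + 1, ?_, ?_⟩
        · have hmul : (pvPrereqs m p).length * pvE L f ≤ L * pvE L f :=
            Nat.mul_le_mul_right _ (HL p)
          have hE : pvE L (f+1) = 2 + L * pvE L f := rfl
          simp only [List.length_cons, Nat.succ_mul]
          omega
        · simp only [pvLoopB, hc]
          simpa using hrun₃

-- ===== VERDICT (by name: the statement is the Claim_ definition above) =====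
theorem build_prerequisite_chain_py_spec : Claim_equal_build_prerequisite_chain_py := by
  intro obj m _
  unfold Spec_build_prerequisite_chain_py build_prerequisite_chain_py build_prerequisite_chain_py_alt
  have hA : pvDfsA m ((pvNodes obj m).length + 1) (PySem.Set.ofList [], []) obj
      = (pvPrereqs m obj).foldl (pvStep m (pvNodes obj m).length) (PySem.Set.ofList [obj], []) := rfl
  set U := pvNodes obj m with hU
  set L := pvL m with hL
  set s1 := (pvPrereqs m obj).foldl (pvStep m U.length) (PySem.Set.ofList [obj], []) with hs1
  have hcont : pvLoopB m 2 s1.1 s1.2 [(obj, [])] = some s1.2 := by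
    simp [pvLoopB]
  have hobj : (PySem.Set.ofList [obj]).contains obj = true := by
    simp [PySem.Set.contains_iff, PySem.Set.mem_ofList]
  have hf : pvUnvis U (PySem.Set.ofList [obj]) < U.length := by
    rw [hU]
    unfold pvUnvis pvNodes
    rw [List.countP_cons]
    have h0 : (if (!(PySem.Set.ofList [obj]).contains obj) = true then 1 else 0) = 0 := by
      simp [hobj]
    rw [h0]
    have hcp := List.countP_le_length (l := m.flatMap (fun kv => kv.2))
      (p := fun u => !(PySem.Set.ofList [obj]).contains u)
    simp only [List.length_cons]
    omega
  have HUall : ∀ p q, q ∈ pvPrereqs m p → q ∈ U := by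
    intro p q h
    rw [hU]
    exact List.mem_cons_of_mem _ (pvPrereqs_sub m p q h)
  obtain ⟨g, hg, hrun⟩ :=
    pvMain m U L HUall (fun p => hL ▸ pvPrereqs_len_le m p) U.length (pvPrereqs m obj)
      (PySem.Set.ofList [obj]) [] obj [] 2 s1.2 hf
      (fun p hp => HUall obj p hp) (by rw [← hs1]; exact hcont)
  have hfuel : g ≤ pvFuelB obj m := by
    unfold pvFuelB
    rw [← hU, ← hL]
    exact hg
  have hrun' : pvLoopB m (pvFuelB obj m) (PySem.Set.ofList [obj]) []
      [(obj, pvPrereqs m obj)] = some s1.2 :=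
    pvLoopB_mono m g (pvFuelB obj m) _ _ _ _ hfuel hrun
  rw [hA, hrun']
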